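-- pv_equiv track=rewrite | github.com/ZuzannaPietka/groupwork2 | main.py | order_to_left
-- ===== SOURCE A (Python) =====
-- def order_to_left(input_list):
--   max_lengths = [max(map(len, map(str, col))) for col in zip(*input_list)]
--   output_list = []
--
--   for row in input_list:
--     output_row = []
--     for i, item in zip(row, max_lengths):
--       output_value = str(i).ljust(item)
--       output_row.append(output_value)
--     output_list.append(output_row)
--
--   return output_list
-- ===== SOURCE B (Python) =====
-- def order_to_left(input_list):
--     # One running pass: fold the rows into a per-column running-maximum width
--     # list (zip truncation keeps it at the shortest row's length), no transpose.
--     widths = None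
--     for row in input_list:
--         lens = [len(str(x)) for x in row]
--         if widths is None:
--             widths = lens
--         else:
--             widths = [w if w >= l else l for w, l in zip(widths, lens)]
--     if widths is None:
--         widths = []
--     return [[str(x).ljust(w) for x, w in zip(row, widths)] for row in input_list]
-- ===== Notes on version B (the rewrite author's own statement) =====
-- stated objective: alternative
-- what changed: B replaces A's transpose-the-table-then-take-column-max precomputation with a single running fold that maintains a per-column maximum-width list across rows (zip truncation keeping it at the shortest row's length), then pads each row against that list.
import Mathlib
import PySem

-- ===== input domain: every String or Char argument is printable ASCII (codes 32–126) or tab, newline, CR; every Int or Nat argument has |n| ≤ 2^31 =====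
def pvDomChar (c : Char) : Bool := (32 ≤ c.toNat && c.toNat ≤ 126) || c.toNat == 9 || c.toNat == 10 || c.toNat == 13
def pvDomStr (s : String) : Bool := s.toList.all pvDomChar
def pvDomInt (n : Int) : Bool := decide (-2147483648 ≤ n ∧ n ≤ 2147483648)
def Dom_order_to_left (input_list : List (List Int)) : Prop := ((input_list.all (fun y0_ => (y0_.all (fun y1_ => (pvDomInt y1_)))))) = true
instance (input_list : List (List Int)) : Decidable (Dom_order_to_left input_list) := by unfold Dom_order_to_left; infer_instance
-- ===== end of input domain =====

-- ===== PORT A =====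
-- B left-justifies via a single running-maximum fold over the rows instead of A's transpose-then-max; alternative decomposition, same cost.

-- len(str(i))
def lenStr (i : Int) : Int := PySem.Str.len (PySem.Int.toStr i)

-- str(x).ljust(w)  (exact: pads with spaces on the right up to width w, never truncates)
def pyLjust (s : String) (w : Int) : String :=
  String.ofList (s.toList ++ List.replicate (w - PySem.Str.len s).toNat ' ')

-- zip(*input_list): Python's n-ary zip, truncating to the shortest row
def pyZipStar : List (List Int) → List (List Int)
  | [] => []
  | [r] => r.map (fun x => [x])
  | r :: rs => List.zipWith (fun x c => x :: c) r (pyZipStar rs)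

-- max(map(len, map(str, col)))  (Python max raises on []; unreachable here since zip columns are nonempty)
def colMax (col : List Int) : Int :=
  (PySem.List.max? (col.map lenStr) (fun y => y)).getD 0

def order_to_left (input_list : List (List Int)) : List (List String) :=
  let maxLengths := (pyZipStar input_list).map colMax
  input_list.foldl (fun output_list row =>
    output_list ++ [ (row.zip maxLengths).foldl
        (fun output_row p => output_row ++ [pyLjust (PySem.Int.toStr p.1) p.2]) [] ]) []

-- ===== PORT B =====
-- loop body of B's widths pass: fold one row's cell widths into the running per-column maximum
def bStep (w : Option (List Int)) (row : List Int) : Option (List Int) :=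
  let lens := row.map lenStr
  match w with
  | none => some lens
  | some ws => some (List.zipWith (fun a b => if a ≥ b then a else b) ws lens)

def order_to_left_alt (input_list : List (List Int)) : List (List String) :=
  let widths := (input_list.foldl bStep none).getD []
  input_list.map (fun row =>
    List.zipWith (fun x w => pyLjust (PySem.Int.toStr x) w) row widths)

-- ===== PRECONDITION & SPEC =====
def Spec_order_to_left (input_list : List (List Int)) (out : List (List String)) : Prop := out = order_to_left_alt input_list
instance (input_list : List (List Int)) (out : List (List String)) : Decidable (Spec_order_to_left input_list out) := by unfold Spec_order_to_left; infer_instance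

-- ===== CLAIM (what is proved, stated in full; the proofs are below) =====
def Claim_equal_order_to_left : Prop := ∀ (input_list : List (List Int)), Dom_order_to_left input_list → Spec_order_to_left input_list (order_to_left input_list)

-- ===== LEMMAS AND PROOFS =====

theorem ifmax_eq_max : (fun a b : Int => if a ≥ b then a else b) = max := by
  funext a b; split <;> omega

theorem foldl_max_comm (l : List Int) : ∀ a b : Int, l.foldl max (max a b) = max a (l.foldl max b) := by
  induction l with
  | nil => intro a b; rfl
  | cons x t ih =>
      intro a b
      simp only [List.foldl_cons]
      rw [max_assoc, ih]

theorem colMax_singleton (x : Int) : colMax [x] = lenStr x := by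
  simp [colMax, PySem.List.max?_id_cons]

theorem colMax_cons (x : Int) (c : List Int) (hc : c ≠ []) :
    colMax (x :: c) = max (lenStr x) (colMax c) := by
  cases c with
  | nil => exact absurd rfl hc
  | cons y c' =>
      simp only [colMax, List.map_cons, PySem.List.max?_id_cons, Option.getD_some,
        List.foldl_cons]
      rw [← foldl_max_comm]

theorem mem_zipWith_cons_ne_nil :
    ∀ (r : List Int) (Z : List (List Int)) (c : List Int),
      c ∈ List.zipWith (fun x c => x :: c) r Z → c ≠ [] := by
  intro r
  induction r with
  | nil => intro Z c hc; simp at hc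
  | cons x r' ih =>
      intro Z c hc
      cases Z with
      | nil => simp at hc
      | cons d Z' =>
          simp only [List.zipWith_cons_cons, List.mem_cons] at hc
          rcases hc with rfl | hc
          · simp
          · exact ih Z' c hc

theorem zipStar_mem_ne_nil (rows : List (List Int)) :
    ∀ c ∈ pyZipStar rows, c ≠ [] := by
  induction rows with
  | nil => simp [pyZipStar]
  | cons r rs ih =>
      cases rs with
      | nil =>
          intro c hc
          simp only [pyZipStar, List.mem_map] at hc
          obtain ⟨x, _, rfl⟩ := hc
          simp
      | cons r2 rest =>
          intro c hc
          simp only [pyZipStar] at hc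
          exact mem_zipWith_cons_ne_nil r (pyZipStar (r2 :: rest)) c hc

theorem map_colMax_zipWith_cons :
    ∀ (r : List Int) (Z : List (List Int)), (∀ c ∈ Z, c ≠ []) →
      (List.zipWith (fun x c => x :: c) r Z).map colMax
        = List.zipWith (fun x c => max (lenStr x) (colMax c)) r Z := by
  intro r
  induction r with
  | nil => intro Z _; simp
  | cons x r' ih =>
      intro Z hZ
      cases Z with
      | nil => simp
      | cons c Z' =>
          simp only [List.zipWith_cons_cons, List.map_cons]
          rw [colMax_cons x c (hZ c (by simp)), ih Z' (fun d hd => hZ d (by simp [hd]))]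

theorem zipWith_max_lenStr (r : List Int) (Z : List (List Int)) :
    List.zipWith (fun x c => max (lenStr x) (colMax c)) r Z
      = List.zipWith max (r.map lenStr) (Z.map colMax) := by
  rw [List.zipWith_map]

-- recurrence: the column maxima of (r :: rs) are the pointwise max of r's widths and rs's column maxima
theorem colMaxes_cons (r r2 : List Int) (rest : List (List Int)) :
    (pyZipStar (r :: r2 :: rest)).map colMax
      = List.zipWith max (r.map lenStr) ((pyZipStar (r2 :: rest)).map colMax) := by
  show ((List.zipWith (fun x c => x :: c) r (pyZipStar (r2 :: rest))).map colMax) = _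
  rw [map_colMax_zipWith_cons r _ (zipStar_mem_ne_nil _), zipWith_max_lenStr]

theorem colMaxes_single (r : List Int) :
    (pyZipStar [r]).map colMax = r.map lenStr := by
  simp [pyZipStar, List.map_map, Function.comp, colMax_singleton]

theorem zipWith_max_assoc : ∀ (a b c : List Int),
    List.zipWith max (List.zipWith max a b) c = List.zipWith max a (List.zipWith max b c) := by
  intro a
  induction a with
  | nil => intro b c; simp
  | cons x a' ih =>
      intro b c
      cases b with
      | nil => simp
      | cons y b' =>
          cases c with
          | nil => simp
          | cons z c' => simp [max_assoc, ih]

theorem bStep_some (ws row : List Int) :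
    bStep (some ws) row = some (List.zipWith max ws (row.map lenStr)) := by
  simp [bStep, ifmax_eq_max]

theorem foldl_bStep_some (rows : List (List Int)) :
    ∀ w : List Int, rows ≠ [] →
      rows.foldl bStep (some w) = some (List.zipWith max w ((pyZipStar rows).map colMax)) := by
  induction rows with
  | nil => intro w h; exact absurd rfl h
  | cons r rs ih =>
      intro w _
      cases rs with
      | nil =>
          simp only [List.foldl_cons, List.foldl_nil, bStep_some, colMaxes_single]
      | cons r2 rest =>
          rw [List.foldl_cons, bStep_some, ih _ (by simp), zipWith_max_assoc, ← colMaxes_cons]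

theorem widths_eq (rows : List (List Int)) :
    (rows.foldl bStep none).getD [] = (pyZipStar rows).map colMax := by
  cases rows with
  | nil => rfl
  | cons r rs =>
      cases rs with
      | nil => simp [bStep, colMaxes_single]
      | cons r2 rest =>
          have : (r :: r2 :: rest).foldl bStep none
              = (r2 :: rest).foldl bStep (some (r.map lenStr)) := by
            simp [bStep]
          rw [this, foldl_bStep_some _ _ (by simp), ← colMaxes_cons]
          rfl

theorem foldl_append_map {α β : Type} (l : List α) (g : α → β) :
    ∀ init : List β, l.foldl (fun acc x => acc ++ [g x]) init = init ++ l.map g := by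
  induction l with
  | nil => intro init; simp
  | cons x t ih => intro init; simp [ih]

theorem zip_map_eq_zipWith {α β γ : Type} (g : α → β → γ) :
    ∀ (l1 : List α) (l2 : List β),
      (l1.zip l2).map (fun p => g p.1 p.2) = List.zipWith g l1 l2 := by
  intro l1
  induction l1 with
  | nil => intro l2; simp
  | cons x t ih =>
      intro l2
      cases l2 with
      | nil => simp
      | cons y t2 => simp [ih]

-- ===== VERDICT (by name: the statement is the Claim_ definition above) =====
theorem order_to_left_spec : Claim_equal_order_to_left := by
  intro input_list _
  unfold Spec_order_to_left order_to_left order_to_left_alt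
  rw [← widths_eq]
  generalize (input_list.foldl bStep none).getD [] = W
  rw [foldl_append_map]
  simp only [List.nil_append]
  apply List.map_congr_left
  intro row _
  rw [foldl_append_map]
  simp only [List.nil_append]
  exact zip_map_eq_zipWith (fun x w => pyLjust (PySem.Int.toStr x) w) row W
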